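-- pv_equiv track=rewrite | github.com/JGJF0/MSc-Thesis | data_processing.py | identify_kindness
-- ===== SOURCE A (Python) =====
-- def generate_ngram(tokens, n):
--     # Generate n-grams
--     ngram = [tuple(tokens[i:i+n]) for i in range(len(tokens)-n+1)]
--     return ngram
--
-- def identify_kindness(lemmas):
--     # Define list of keywords and phrases indicating kindness
--     keywords = ['help', 'donate', 'donation', 'helpful', 'children', 'kid', 'teen', 'sick', 'ill', 'support', 'care',
--                 'charity', 'kind', 'kindness', 'aid', 'contribute', 'contribution', 'save']
--     key_bigrams = [('do', 'better'), ('in', 'memory'), ('in', 'need')]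
--     key_trigrams = [('make', 'a', 'difference'), ('make', 'a', 'change')]
--
--     # Generate n-grams
--     bigrams = generate_ngram(lemmas, 2)
--     trigrams = generate_ngram(lemmas, 3)
--
--     # Identify presence of keywords or 2-/3-grams, indicating kindness
--     for lemma in lemmas:
--         if lemma in keywords:
--             return True
--
--     for bigram in bigrams:
--         if bigram in key_bigrams:
--             return True
--
--     for trigram in trigrams:
--         if trigram in key_trigrams:
--             return True
--     return False
-- ===== SOURCE B (Python) =====
-- KEYWORD_SET = frozenset(['help', 'donate', 'donation', 'helpful', 'children', 'kid', 'teen', 'sick', 'ill',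
--                          'support', 'care', 'charity', 'kind', 'kindness', 'aid', 'contribute',
--                          'contribution', 'save'])
-- BIGRAM_SET = frozenset([('do', 'better'), ('in', 'memory'), ('in', 'need')])
-- TRIGRAM_SET = frozenset([('make', 'a', 'difference'), ('make', 'a', 'change')])
--
-- def identify_kindness(lemmas):
--     # Single fused pass: at each position check the unigram, and (when enough
--     # tokens remain) the bigram/trigram starting there, via hashed set lookups.
--     n = len(lemmas)
--     for i in range(n):
--         if lemmas[i] in KEYWORD_SET:
--             return True
--         if i + 1 < n and (lemmas[i], lemmas[i + 1]) in BIGRAM_SET: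
--             return True
--         if i + 2 < n and (lemmas[i], lemmas[i + 1], lemmas[i + 2]) in TRIGRAM_SET:
--             return True
--     return False
-- ===== Notes on version B (the rewrite author's own statement) =====
-- stated objective: faster
-- what changed: Replaced the three sequential scans (keyword scan plus two materialized n-gram lists from generate_ngram) by one fused index loop that checks the unigram, bigram and trigram starting at each position against prebuilt hashed sets.
import Mathlib
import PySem

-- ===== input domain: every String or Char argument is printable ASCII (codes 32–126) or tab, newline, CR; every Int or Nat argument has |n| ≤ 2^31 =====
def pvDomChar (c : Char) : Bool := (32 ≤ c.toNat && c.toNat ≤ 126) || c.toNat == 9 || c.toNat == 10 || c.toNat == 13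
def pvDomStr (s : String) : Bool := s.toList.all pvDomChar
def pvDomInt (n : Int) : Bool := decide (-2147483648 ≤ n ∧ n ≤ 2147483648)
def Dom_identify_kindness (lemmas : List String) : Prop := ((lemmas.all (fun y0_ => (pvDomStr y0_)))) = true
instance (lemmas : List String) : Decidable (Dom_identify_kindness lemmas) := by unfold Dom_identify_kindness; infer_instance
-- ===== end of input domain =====

-- B fuses A's three scans (keyword pass + two materialized n-gram lists) into one
-- index loop with set lookups; same Boolean result, alternative decomposition.

-- ===== PORT A =====
def pvKeywords : List String :=
  ["help", "donate", "donation", "helpful", "children", "kid", "teen", "sick", "ill",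
   "support", "care", "charity", "kind", "kindness", "aid", "contribute", "contribution", "save"]
def pvKeyBigrams : List (String × String) := [("do", "better"), ("in", "memory"), ("in", "need")]
def pvKeyTrigrams : List (String × String × String) :=
  [("make", "a", "difference"), ("make", "a", "change")]

-- generate_ngram for n = 2: tuple(tokens[i:i+2]) read by its two indices, which the
-- range keeps in bounds (exact: i and i+1 are valid indices for every i in the range)
def generate_bigram (tokens : List String) : List (String × String) :=
  (PySem.List.pyRange 0 ((tokens.length : Int) - 2 + 1) 1).map
    (fun i => (PySem.List.pyGetD tokens i "", PySem.List.pyGetD tokens (i + 1) ""))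

-- generate_ngram for n = 3, same reading
def generate_trigram (tokens : List String) : List (String × String × String) :=
  (PySem.List.pyRange 0 ((tokens.length : Int) - 3 + 1) 1).map
    (fun i => (PySem.List.pyGetD tokens i "",
               PySem.List.pyGetD tokens (i + 1) "",
               PySem.List.pyGetD tokens (i + 2) ""))

-- the three early-return for-loops, in order
def identify_kindness (lemmas : List String) : Bool :=
  (lemmas.any (fun lemma_ => pvKeywords.contains lemma_)) ||
  ((generate_bigram lemmas).any (fun bigram => pvKeyBigrams.contains bigram)) ||
  ((generate_trigram lemmas).any (fun trigram => pvKeyTrigrams.contains trigram))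

-- ===== PORT B =====
def pvKeywordSet : PySem.Set String := PySem.Set.ofList
  ["help", "donate", "donation", "helpful", "children", "kid", "teen", "sick", "ill",
   "support", "care", "charity", "kind", "kindness", "aid", "contribute", "contribution", "save"]
def pvBigramSet : PySem.Set (String × String) :=
  PySem.Set.ofList [("do", "better"), ("in", "memory"), ("in", "need")]
def pvTrigramSet : PySem.Set (String × String × String) :=
  PySem.Set.ofList [("make", "a", "difference"), ("make", "a", "change")]

-- the fused loop over positions i (recursion on the suffix starting at i)
def goKindness : List String → Bool
  | [] => false
  | a :: rest =>
    (PySem.Set.contains pvKeywordSet a ||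
     (match rest with
      | [] => false
      | b :: rest2 =>
        PySem.Set.contains pvBigramSet (a, b) ||
        (match rest2 with
         | [] => false
         | c :: _ => PySem.Set.contains pvTrigramSet (a, b, c)))) ||
    goKindness rest

def identify_kindness_alt (lemmas : List String) : Bool := goKindness lemmas

-- ===== PRECONDITION & SPEC =====
def Spec_identify_kindness (lemmas : List String) (out : Bool) : Prop := out = identify_kindness_alt lemmas
instance (lemmas : List String) (out : Bool) : Decidable (Spec_identify_kindness lemmas out) := by unfold Spec_identify_kindness; infer_instance

-- ===== CLAIM (what is proved, stated in full; the proofs are below) =====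
def Claim_equal_identify_kindness : Prop := ∀ (lemmas : List String), Dom_identify_kindness lemmas → Spec_identify_kindness lemmas (identify_kindness lemmas)

-- ===== LEMMAS AND PROOFS =====

lemma generate_bigram_single (a : String) : generate_bigram [a] = [] := by
  simp [generate_bigram, PySem.List.pyRange_one_eq_nil]

lemma generate_bigram_cons (a b : String) (t : List String) :
    generate_bigram (a :: b :: t) = (a, b) :: generate_bigram (b :: t) := by
  simp only [generate_bigram, List.length_cons, PySem.List.pyRange_one]
  have h2 : ((((t.length + 1 + 1 : Nat) : Int) - 2 + 1 - 0)).toNat = t.length + 1 := by omega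
  have h1 : ((((t.length + 1 : Nat) : Int) - 2 + 1 - 0)).toNat = t.length := by omega
  rw [h2, h1, List.range_succ_eq_map]
  simp only [List.map_cons, List.map_map]
  congr 1
  · have i0 : (0 : Int) + ((0 : Nat) : Int) = ((0 : Nat) : Int) := by norm_num
    have i1 : (0 : Int) + ((0 : Nat) : Int) + 1 = ((1 : Nat) : Int) := by norm_num
    rw [i1, i0, PySem.List.pyGetD_natCast, PySem.List.pyGetD_natCast]
    rfl
  · apply List.map_congr_left
    intro k _
    simp only [Function.comp, Nat.succ_eq_add_one]
    have j1 : (0 : Int) + ((k + 1 : Nat) : Int) = ((k + 1 : Nat) : Int) := by omega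
    have j2 : (0 : Int) + ((k + 1 : Nat) : Int) + 1 = ((k + 2 : Nat) : Int) := by omega
    have j3 : (0 : Int) + ((k : Nat) : Int) = ((k : Nat) : Int) := by omega
    have j4 : (0 : Int) + ((k : Nat) : Int) + 1 = ((k + 1 : Nat) : Int) := by omega
    rw [j2, j1, j4, j3, PySem.List.pyGetD_natCast, PySem.List.pyGetD_natCast,
        PySem.List.pyGetD_natCast, PySem.List.pyGetD_natCast]
    rw [show k + 2 = (k + 1) + 1 from rfl, List.getD_cons_succ, List.getD_cons_succ]

lemma generate_trigram_single (a : String) : generate_trigram [a] = [] := by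
  simp [generate_trigram, PySem.List.pyRange_one_eq_nil]

lemma generate_trigram_pair (a b : String) : generate_trigram [a, b] = [] := by
  simp [generate_trigram, PySem.List.pyRange_one_eq_nil]

lemma generate_trigram_cons (a b c : String) (t : List String) :
    generate_trigram (a :: b :: c :: t) = (a, b, c) :: generate_trigram (b :: c :: t) := by
  simp only [generate_trigram, List.length_cons, PySem.List.pyRange_one]
  have h2 : ((((t.length + 1 + 1 + 1 : Nat) : Int) - 3 + 1 - 0)).toNat = t.length + 1 := by omega
  have h1 : ((((t.length + 1 + 1 : Nat) : Int) - 3 + 1 - 0)).toNat = t.length := by omega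
  rw [h2, h1, List.range_succ_eq_map]
  simp only [List.map_cons, List.map_map]
  congr 1
  · have i0 : (0 : Int) + ((0 : Nat) : Int) = ((0 : Nat) : Int) := by norm_num
    have i1 : (0 : Int) + ((0 : Nat) : Int) + 1 = ((1 : Nat) : Int) := by norm_num
    have i2 : (0 : Int) + ((0 : Nat) : Int) + 2 = ((2 : Nat) : Int) := by norm_num
    rw [i2, i1, i0, PySem.List.pyGetD_natCast, PySem.List.pyGetD_natCast,
        PySem.List.pyGetD_natCast]
    rfl
  · apply List.map_congr_left
    intro k _
    simp only [Function.comp, Nat.succ_eq_add_one]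
    have j1 : (0 : Int) + ((k + 1 : Nat) : Int) = ((k + 1 : Nat) : Int) := by omega
    have j2 : (0 : Int) + ((k + 1 : Nat) : Int) + 1 = ((k + 2 : Nat) : Int) := by omega
    have j3 : (0 : Int) + ((k + 1 : Nat) : Int) + 2 = ((k + 3 : Nat) : Int) := by omega
    have j4 : (0 : Int) + ((k : Nat) : Int) = ((k : Nat) : Int) := by omega
    have j5 : (0 : Int) + ((k : Nat) : Int) + 1 = ((k + 1 : Nat) : Int) := by omega
    have j6 : (0 : Int) + ((k : Nat) : Int) + 2 = ((k + 2 : Nat) : Int) := by omega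
    rw [j3, j2, j1, j6, j5, j4, PySem.List.pyGetD_natCast, PySem.List.pyGetD_natCast,
        PySem.List.pyGetD_natCast, PySem.List.pyGetD_natCast, PySem.List.pyGetD_natCast,
        PySem.List.pyGetD_natCast]
    rw [show k + 2 = (k + 1) + 1 from rfl, show k + 3 = (k + 2) + 1 from rfl,
        List.getD_cons_succ, List.getD_cons_succ, List.getD_cons_succ]
    have hk : k + 2 + 1 = (k + 1 + 1) + 1 := by omega
    rw [hk, List.getD_cons_succ]

lemma kw_eq (a : String) : PySem.Set.contains pvKeywordSet a = pvKeywords.contains a := by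
  have : pvKeywordSet = pvKeywords := by decide
  rw [this]
  simp [PySem.Set.contains]

lemma bg_eq (p : String × String) : PySem.Set.contains pvBigramSet p = pvKeyBigrams.contains p := by
  have : pvBigramSet = pvKeyBigrams := by decide
  rw [this]
  simp [PySem.Set.contains]

lemma tg_eq (p : String × String × String) :
    PySem.Set.contains pvTrigramSet p = pvKeyTrigrams.contains p := by
  have : pvTrigramSet = pvKeyTrigrams := by decide
  rw [this]
  simp [PySem.Set.contains]

lemma fused_eq (l : List String) : identify_kindness l = goKindness l := by
  induction l with
  | nil => decide
  | cons a rest ih =>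
    match rest with
    | [] =>
      unfold identify_kindness
      rw [generate_bigram_single, generate_trigram_single, goKindness, goKindness]
      simp only [List.any_cons, List.any_nil, kw_eq]
      cases pvKeywords.contains a <;> simp
    | [b] =>
      unfold identify_kindness at ih ⊢
      rw [generate_bigram_cons, generate_bigram_single, generate_trigram_pair] at *
      rw [generate_trigram_single] at ih
      rw [goKindness, ← ih]
      simp only [List.any_cons, List.any_nil, kw_eq, bg_eq]
      cases pvKeywords.contains a <;> cases pvKeywords.contains b <;>
        cases pvKeyBigrams.contains (a, b) <;> simp
    | b :: c :: t =>
      unfold identify_kindness at ih ⊢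
      rw [generate_bigram_cons, generate_trigram_cons]
      rw [goKindness, ← ih]
      simp only [List.any_cons, kw_eq, bg_eq, tg_eq]
      cases pvKeywords.contains a <;> cases pvKeyBigrams.contains (a, b) <;>
        cases pvKeyTrigrams.contains (a, b, c) <;> simp

-- ===== VERDICT (by name: the statement is the Claim_ definition above) =====
theorem identify_kindness_spec : Claim_equal_identify_kindness := by
  intro lemmas _
  unfold Spec_identify_kindness identify_kindness_alt
  exact fused_eq lemmas
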